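-- pv_equiv track=rewrite | github.com/qiwi1272/SteamBot | ipc_interface.py | parse
-- ===== SOURCE A (Python) =====
-- def parse(s):
--     '''removes username from response'''
--     resp = []
--     less_than = False
--     for c in s:
--         if c == '>':
--             less_than = True
--             continue
--         if less_than and c != ' ':
--             resp.append(c)
--     return ''.join(resp)
-- ===== SOURCE B (Python) =====
-- def parse(s):
--     '''removes username from response'''
--     i = s.find('>')
--     if i == -1:
--         return ''
--     return ''.join(c for c in s[i + 1:] if c != ' ' and c != '>')
-- ===== Notes on version B (the rewrite author's own statement) =====
-- stated objective: faster
-- what changed: Replaces the single stateful flag-carrying character scan with a locate-then-slice-then-filter pipeline (str.find, slicing, a filtering join), moving the search into C-level string primitives.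
import Mathlib
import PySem

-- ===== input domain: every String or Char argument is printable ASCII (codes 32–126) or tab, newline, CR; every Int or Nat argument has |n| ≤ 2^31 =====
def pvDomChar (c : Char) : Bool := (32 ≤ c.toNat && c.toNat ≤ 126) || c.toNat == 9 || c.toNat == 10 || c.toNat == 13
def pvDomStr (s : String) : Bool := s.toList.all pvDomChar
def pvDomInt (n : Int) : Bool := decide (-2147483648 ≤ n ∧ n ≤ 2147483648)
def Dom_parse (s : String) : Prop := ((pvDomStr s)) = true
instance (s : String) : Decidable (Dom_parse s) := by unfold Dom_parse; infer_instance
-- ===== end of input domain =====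

-- B replaces A's stateful flag-carrying scan by an idiomatic find-the-first-'>',
-- slice-the-suffix, filter-out-' '/'>' pipeline; equal on all strings.


-- ===== PORT A =====
-- one step of A's loop over the state (resp, less_than)
def parseStep (st : List Char × Bool) (c : Char) : List Char × Bool :=
  if c = '>' then (st.1, true)
  else if st.2 = true ∧ c ≠ ' ' then (st.1 ++ [c], st.2)
  else st

def parse (s : String) : String :=
  String.ofList (s.toList.foldl parseStep ([], false)).1

-- ===== PORT B =====
def parse_alt (s : String) : String :=
  let i := PySem.Str.find s ">"
  if i = -1 then ""
  else String.ofList ((PySem.Str.slice s (some (i + 1)) none).toList.filter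
        (fun c => decide (c ≠ ' ') && decide (c ≠ '>')))

-- ===== PRECONDITION & SPEC =====
def Spec_parse (s : String) (out : String) : Prop := out = parse_alt s
instance (s : String) (out : String) : Decidable (Spec_parse s out) := by unfold Spec_parse; infer_instance

-- ===== CLAIM (what is proved, stated in full; the proofs are below) =====
def Claim_equal_parse : Prop := ∀ (s : String), Dom_parse s → Spec_parse s (parse s)

-- ===== LEMMAS AND PROOFS =====

theorem foldl_parseStep_true (cs : List Char) (acc : List Char) :
    cs.foldl parseStep (acc, true)
      = (acc ++ cs.filter (fun c => decide (c ≠ ' ') && decide (c ≠ '>')), true) := by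
  induction cs generalizing acc with
  | nil => simp
  | cons c cs ih =>
    by_cases hgt : c = '>'
    · subst hgt; simpa [parseStep, List.foldl_cons] using ih acc
    · by_cases hsp : c = ' '
      · subst hsp; simpa [parseStep, List.foldl_cons] using ih acc
      · simp [parseStep, hgt, hsp, List.foldl_cons, ih (acc ++ [c])]

theorem foldl_parseStep_false (cs : List Char) (acc : List Char) (h : '>' ∉ cs) :
    cs.foldl parseStep (acc, false) = (acc, false) := by
  induction cs with
  | nil => rfl
  | cons c cs ih =>
    have hc : c ≠ '>' := fun hc => h (hc ▸ List.mem_cons_self ..)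
    have hcs : '>' ∉ cs := fun hm => h (List.mem_cons_of_mem _ hm)
    simp [List.foldl_cons, parseStep, hc, ih hcs]

theorem singleton_prefix_head {x : Char} {l : List Char} (h : [x] <+: l) :
    ∃ t, l = x :: t := by
  obtain ⟨t, ht⟩ := h
  exact ⟨t, by simpa using ht.symm⟩

-- ===== VERDICT (by name: the statement is the Claim_ definition above) =====
theorem parse_spec : Claim_equal_parse := by
  intro s _
  unfold Spec_parse parse parse_alt
  set cs := s.toList with hcs
  by_cases h : PySem.Chars.find cs ['>'] = -1
  · -- no '>' in s
    have hne : '>' ∉ cs := by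
      intro hm
      have : ['>'] <:+: cs := by
        obtain ⟨l1, l2, hl⟩ := List.mem_iff_append.mp hm
        exact ⟨l1, l2, by simp [hl]⟩
      exact (PySem.Chars.find_eq_neg_one_iff cs ['>']).mp h this
    simp [PySem.Str.find, ← hcs, h, foldl_parseStep_false cs [] hne]
  · -- '>' at least-index n
    have hspec := PySem.Chars.findFrom_natCast_spec cs ['>'] 0 (Nat.zero_le _)
      (by simpa using h)
    simp only [Nat.cast_zero, PySem.Chars.findFrom_zero] at hspec
    obtain ⟨hle, hpre, hmin⟩ := hspec
    set n := (PySem.Chars.find cs ['>']).toNat with hn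
    obtain ⟨t, ht⟩ := singleton_prefix_head hpre
    have hfind : PySem.Chars.find cs ['>'] = (n : Int) := by omega
    have hsplit : cs = cs.take n ++ '>' :: t := by
      conv_lhs => rw [← List.take_append_drop n cs, ht]
    have htake : '>' ∉ cs.take n := by
      intro hm
      obtain ⟨i, hi, hgt⟩ := List.mem_take_iff_getElem.mp hm
      have hilt : i < n := lt_of_lt_of_le hi (min_le_left _ _)
      refine hmin i (by omega) (by omega) ?_
      have hdrop : cs.drop i = cs[i] :: cs.drop (i + 1) :=
        List.drop_eq_getElem_cons _
      rw [hdrop, hgt]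
      exact ⟨cs.drop (i + 1), rfl⟩
    have htl : t = cs.drop (n + 1) := by
      have : cs.drop (n + 1) = (cs.drop n).drop 1 := by
        rw [List.drop_drop]
      rw [this, ht]; rfl
    -- A side
    have hA : (cs.foldl parseStep ([], false)).1
        = t.filter (fun c => decide (c ≠ ' ') && decide (c ≠ '>')) := by
      rw [hsplit, List.foldl_append,
        foldl_parseStep_false _ _ htake, List.foldl_cons]
      have hstep : parseStep ([], false) '>' = ([], true) := by decide
      rw [hstep, foldl_parseStep_true]
      simp
    -- B side
    have hB : PySem.Str.slice s (some (PySem.Str.find s ">" + 1)) none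
        = String.ofList (cs.drop (n + 1)) := by
      have : PySem.Str.find s ">" = (n : Int) := by
        simpa [PySem.Str.find, ← hcs] using hfind
      rw [PySem.Str.slice, this, ← hcs]
      rw [show PySem.Chars.slice cs (some ((n : Int) + 1)) none
            = PySem.List.slice cs (some ((n : Int) + 1)) none from rfl,
        PySem.List.slice_from cs (by omega)]
      norm_num
    have hfne : ¬ PySem.Str.find s ">" = -1 := by
      simpa [PySem.Str.find, ← hcs] using h
    rw [hA]
    simp only [hfne, hB]
    rw [← htl]
    congr 1
    simp
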